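-- pv_equiv track=rewrite | github.com/aidangollan/MSU-CSE231 | CSE231/proj8/proj08.py | find_max_common_friends
-- ===== SOURCE A (Python) =====
-- def find_common_friends(name1, name2, friends_dict): #finds common friends between 2 people
--     name1_list = friends_dict[name1] #makes list of person one's friend's
--     name2_list = friends_dict[name2] #makes list of person two's friend's
--     cmn_name_list = [] #initializes common name list
--     for i in name1_list: #for each element in list 1
--         if i in name2_list: #checks if element is in list 2
--             cmn_name_list.append(i) #adds element to common list
--     cmn_name_list = set(cmn_name_list) #turns list into set
--     return(cmn_name_list) #returns set
--
-- def find_max_common_friends(friends_dict): #finds the people who have the max number of common friends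
--     possible_pairs = [] #initializes lists
--     cmn_friends_list = []
--     out_list = []
--     for i in friends_dict: #loops through dict 1 time
--         for j in friends_dict: #loops through dict again once for each element
--             if i != j and [j,i] not in possible_pairs: #filters non compatible elements
--                 possible_pairs.append([i,j]) #adds element to possible pairs list
--     for i in possible_pairs: #loops through possible pairs of people
--         cmn_friends_list.append(len(find_common_friends(i[0],i[1],friends_dict))) #adds number of common friends to list
--     for i in enumerate(cmn_friends_list): #goes through each pairing and their common friends
--         if i[1] == max(cmn_friends_list): #if num of common friends is equal to the max
--             out_list.append(tuple(possible_pairs[i[0]])) #add pairing of people to final list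
--     return(out_list,max(cmn_friends_list)) #returns list of pairs with max common friends, and what that max is
-- ===== SOURCE B (Python) =====
-- def find_max_common_friends(friends_dict):
--     people = list(friends_dict)
--     best = None
--     out = []
--     for i, a in enumerate(people):
--         a_set = set(friends_dict[a])
--         for b in people[i + 1:]:
--             common = len(a_set & set(friends_dict[b]))
--             if best is None or common > best:
--                 best = common
--                 out = [(a, b)]
--             elif common == best:
--                 out.append((a, b))
--     if best is None:
--         raise ValueError("need at least two people")
--     return out, best
-- ===== Notes on version B (the rewrite author's own statement) =====
-- stated objective: faster
-- what changed: Replaces A's three-pass pipeline (build a quadratic pair list with a '[j,i] not in possible_pairs' linear scan per pair, then a counts list, then a selection pass that recomputes max() on every iteration) by one fused pass over the combinations of people that keeps a running best count and the list of pairs achieving it.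
import Mathlib
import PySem

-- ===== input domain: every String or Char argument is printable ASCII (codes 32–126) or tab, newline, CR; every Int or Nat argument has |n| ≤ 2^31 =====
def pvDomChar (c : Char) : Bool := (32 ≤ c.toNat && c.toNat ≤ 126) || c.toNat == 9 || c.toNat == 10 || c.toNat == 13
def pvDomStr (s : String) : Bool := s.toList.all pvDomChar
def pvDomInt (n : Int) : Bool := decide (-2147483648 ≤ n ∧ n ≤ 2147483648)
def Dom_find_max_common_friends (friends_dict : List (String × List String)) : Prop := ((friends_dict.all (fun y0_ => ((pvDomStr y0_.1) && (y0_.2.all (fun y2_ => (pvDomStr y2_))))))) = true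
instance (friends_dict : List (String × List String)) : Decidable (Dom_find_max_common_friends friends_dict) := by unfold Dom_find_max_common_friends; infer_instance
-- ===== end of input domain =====

-- B replaces A's three-pass pipeline (quadratic pair list with `[j,i] not in possible_pairs`
-- membership scans, then a counts list, then a selection pass recomputing max) by one fused
-- pass over the combinations that tracks the running best count and its pairs; objective: faster.

-- ===== PORT A =====
-- find_common_friends: d[name] is ported as getD (the function is only called with keys of d,
-- so the KeyError branch of d[name] is unreachable).
def find_common_friends (name1 name2 : String) (friends_dict : PySem.Dict String (List String)) : PySem.Set String :=
  let name1_list := friends_dict.getD name1 []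
  let name2_list := friends_dict.getD name2 []
  let cmn_name_list := name1_list.foldl (fun acc i => if name2_list.contains i then acc ++ [i] else acc) []
  PySem.Set.ofList cmn_name_list

-- max(cmn_friends_list) raises ValueError on an empty list (fewer than two people);
-- ported as .getD 0, those inputs are excluded by Pre_.
def find_max_common_friends (friends_dict : List (String × List String)) : (List (String × String)) × Int :=
  let d := PySem.Dict.ofList friends_dict
  let possible_pairs := d.keys.foldl (fun pp i =>
      d.keys.foldl (fun pp j => if i ≠ j ∧ (j, i) ∉ pp then pp ++ [(i, j)] else pp) pp) []
  let cmn_friends_list : List Int := possible_pairs.foldl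
      (fun acc p => acc ++ [PySem.Set.len (find_common_friends p.1 p.2 d)]) []
  let out_list := (PySem.List.enumerate cmn_friends_list).foldl
      (fun out i => if i.2 = (PySem.List.max? cmn_friends_list (fun x => x)).getD 0
                    then out ++ [PySem.List.pyGetD possible_pairs i.1 ("", "")] else out) []
  (out_list, (PySem.List.max? cmn_friends_list (fun x => x)).getD 0)

-- ===== PORT B =====
def alt_pair_step (d : PySem.Dict String (List String)) (a : String) (a_set : PySem.Set String)
    (s : Option Int × List (String × String)) (b : String) : Option Int × List (String × String) :=
  let common := PySem.Set.len (PySem.Set.inter a_set (PySem.Set.ofList (d.getD b [])))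
  match s.1 with
  | none => (some common, [(a, b)])
  | some best =>
      if common > best then (some common, [(a, b)])
      else if common = best then (s.1, s.2 ++ [(a, b)])
      else s

-- the outer loop `for i, a in enumerate(people): for b in people[i+1:]`
def alt_loop (d : PySem.Dict String (List String)) :
    List String → Option Int × List (String × String) → Option Int × List (String × String)
  | [], s => s
  | a :: rest, s => alt_loop d rest (rest.foldl (alt_pair_step d a (PySem.Set.ofList (d.getD a []))) s)

-- Source B raises ValueError when best is None (fewer than two people); those inputs are outside Pre_.
def find_max_common_friends_alt (friends_dict : List (String × List String)) : (List (String × String)) × Int :=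
  let d := PySem.Dict.ofList friends_dict
  match alt_loop d d.keys (none, []) with
  | (some best, out) => (out, best)
  | (none, _) => ([], 0)

-- ===== PRECONDITION & SPEC =====
-- Pre_ excludes exactly the dicts with fewer than two (distinct) keys, on which
-- A raises ValueError (max() of an empty sequence); Source B raises ValueError there too.
def Pre_find_max_common_friends (friends_dict : List (String × List String)) : Prop :=
  2 ≤ (PySem.List.dedup (friends_dict.map Prod.fst)).length
instance (friends_dict : List (String × List String)) : Decidable (Pre_find_max_common_friends friends_dict) := by
  unfold Pre_find_max_common_friends; infer_instance

def pvWitness_find_max_common_friends : (List (String × List String)) :=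
  [("a", ["x", "y"]), ("b", ["y"])]

def Spec_find_max_common_friends (friends_dict : List (String × List String)) (out : (List (String × String)) × Int) : Prop := out = find_max_common_friends_alt friends_dict
instance (friends_dict : List (String × List String)) (out : (List (String × String)) × Int) : Decidable (Spec_find_max_common_friends friends_dict out) := by unfold Spec_find_max_common_friends; infer_instance

-- ===== CLAIM (what is proved, stated in full; the proofs are below) =====
def Claim_equal_find_max_common_friends : Prop := ∀ (friends_dict : List (String × List String)), Dom_find_max_common_friends friends_dict → Pre_find_max_common_friends friends_dict → Spec_find_max_common_friends friends_dict (find_max_common_friends friends_dict)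

-- ===== LEMMAS AND PROOFS =====

-- `combosAll done rest`: the pairs A's double loop has produced after processing the prefix
-- `done` of the key list, when the keys still to process are `rest`.
def combosAll : List String → List String → List (String × String)
  | [], _ => []
  | a :: t, rest => (t ++ rest).map (fun b => (a, b)) ++ combosAll t rest

-- the common-friend count B computes for a pair
def pvF (d : PySem.Dict String (List String)) (p : String × String) : Int :=
  PySem.Set.len (PySem.Set.inter (PySem.Set.ofList (d.getD p.1 [])) (PySem.Set.ofList (d.getD p.2 [])))

def pvStep (d : PySem.Dict String (List String)) (s : Option Int × List (String × String))
    (p : String × String) : Option Int × List (String × String) :=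
  alt_pair_step d p.1 (PySem.Set.ofList (d.getD p.1 [])) s p.2

lemma mem_combosAll {i j : String} {rest : List String} (hi : i ∈ rest) :
    ∀ done : List String, ((j, i) ∈ combosAll done rest ↔ j ∈ done) := by
  intro done
  induction done with
  | nil => simp [combosAll]
  | cons a t ih =>
      simp only [combosAll, List.mem_append, List.mem_map, List.mem_cons, ih]
      constructor
      · rintro (⟨b, _, hb⟩ | h)
        · exact Or.inl (by cases hb; rfl)
        · exact Or.inr h
      · rintro (rfl | h)
        · exact Or.inl ⟨i, by simp [hi]⟩
        · exact Or.inr h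

lemma combosAll_shift (i : String) (rest : List String) :
    ∀ done : List String,
      combosAll (done ++ [i]) rest = combosAll done (i :: rest) ++ rest.map (fun b => (i, b)) := by
  intro done
  induction done with
  | nil => simp [combosAll]
  | cons a t ih => simp [combosAll, ih]

lemma inner_fold (i : String) (done : List String) :
    ∀ (scan : List String) (acc : List (String × String)),
      (∀ j ∈ scan, j ≠ i → ((j, i) ∈ acc ↔ j ∈ done)) →
      scan.foldl (fun pp j => if i ≠ j ∧ (j, i) ∉ pp then pp ++ [(i, j)] else pp) acc
        = acc ++ (scan.filter (fun j => decide (j ∉ done ∧ j ≠ i))).map (fun b => (i, b)) := by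
  intro scan
  induction scan with
  | nil => intro acc _; simp
  | cons j scan' ih =>
      intro acc hacc
      by_cases hji : j = i
      · subst hji
        simp only [List.foldl_cons, List.filter_cons]
        rw [if_neg (by simp), show (decide (j ∉ done ∧ j ≠ j)) = false by simp]
        exact ih acc (fun j' hj' => hacc j' (List.mem_cons_of_mem _ hj'))
      · have hmem := hacc j (List.mem_cons_self) hji
        by_cases hjd : j ∈ done
        · simp only [List.foldl_cons, List.filter_cons]
          rw [if_neg (by simp [hmem.mpr hjd]), show (decide (j ∉ done ∧ j ≠ i)) = false by simp [hjd]]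
          exact ih acc (fun j' hj' => hacc j' (List.mem_cons_of_mem _ hj'))
        · simp only [List.foldl_cons, List.filter_cons]
          rw [if_pos ⟨fun h => hji h.symm, fun h => hjd (hmem.mp h)⟩,
              show (decide (j ∉ done ∧ j ≠ i)) = true by simp [hjd, hji]]
          have hacc' : ∀ j' ∈ scan', j' ≠ i → ((j', i) ∈ acc ++ [(i, j)] ↔ j' ∈ done) := by
            intro j' hj' hj'i
            rw [List.mem_append]
            constructor
            · rintro (h | h)
              · exact (hacc j' (List.mem_cons_of_mem _ hj') hj'i).mp h
              · have h2 : j' = i ∧ i = j := by simpa using h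
                exact absurd h2.1 hj'i
            · intro h
              exact Or.inl ((hacc j' (List.mem_cons_of_mem _ hj') hj'i).mpr h)
          rw [ih (acc ++ [(i, j)]) hacc']
          simp

lemma outer_fold (ks : List String) (hnd : ks.Nodup) :
    ∀ (rest done : List String), ks = done ++ rest →
      rest.foldl (fun pp i =>
          ks.foldl (fun pp j => if i ≠ j ∧ (j, i) ∉ pp then pp ++ [(i, j)] else pp) pp)
        (combosAll done rest)
      = combosAll ks [] := by
  intro rest
  induction rest with
  | nil => intro done h; simp [h]
  | cons i rest' ih =>
      intro done h
      have hnd' : (done ++ i :: rest').Nodup := h ▸ hnd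
      simp only [List.foldl_cons]
      rw [inner_fold i done ks (combosAll done (i :: rest'))
            (fun j _ hji => mem_combosAll List.mem_cons_self done)]
      have hfilter : ks.filter (fun j => decide (j ∉ done ∧ j ≠ i)) = rest' := by
        rw [h, List.filter_append, List.filter_cons]
        have h1 : done.filter (fun j => decide (j ∉ done ∧ j ≠ i)) = [] := by
          apply List.filter_eq_nil_iff.mpr
          intro j hj; simp [hj]
        have h2 : ¬ (i ∉ done ∧ i ≠ i) := by simp
        rw [h1, show (decide (i ∉ done ∧ i ≠ i)) = false by simp]
        have hdisj : ∀ j ∈ rest', j ∉ done ∧ j ≠ i := by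
          intro j hj
          rw [List.nodup_append] at hnd'
          obtain ⟨_, hnd2, hdis⟩ := hnd'
          constructor
          · intro hjd; exact hdis j hjd j (List.mem_cons_of_mem _ hj) rfl
          · intro hji; subst hji
            exact (List.nodup_cons.mp hnd2).1 hj
        rw [List.filter_eq_self.mpr (fun j hj => by simp [hdisj j hj])]
        simp
      rw [hfilter, ← combosAll_shift i rest' done]
      exact ih (done ++ [i]) (by simp [h])

lemma filter_add {α : Type} [BEq α] [LawfulBEq α] (p : α → Bool) (s : List α) (x : α) :
    (PySem.Set.add s x).filter p
      = if p x = true then PySem.Set.add (s.filter p) x else s.filter p := by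
  rw [PySem.Set.add_eq_ite, PySem.Set.add_eq_ite]
  by_cases hxs : x ∈ s <;> by_cases hpx : p x = true <;>
    simp [hxs, hpx, List.filter_append, List.mem_filter]

lemma set_filter_foldl_add {α : Type} [BEq α] [LawfulBEq α] (p : α → Bool) :
    ∀ (l s : List α),
      (l.foldl PySem.Set.add s).filter p = (l.filter p).foldl PySem.Set.add (s.filter p) := by
  intro l
  induction l with
  | nil => intro s; simp
  | cons x l' ih =>
      intro s
      simp only [List.foldl_cons, List.filter_cons]
      rw [ih (PySem.Set.add s x), filter_add]
      by_cases hpx : p x = true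
      · simp [hpx]
      · simp [hpx]

lemma ofList_filter (p : String → Bool) (l : List String) :
    PySem.Set.ofList (l.filter p) = (PySem.Set.ofList l).filter p := by
  rw [PySem.Set.ofList_eq_foldl, PySem.Set.ofList_eq_foldl,
      show ([] : List String) = ([] : List String).filter p from rfl]
  exact (set_filter_foldl_add p l []).symm

lemma countA_eq (d : PySem.Dict String (List String)) (a b : String) :
    PySem.Set.len (find_common_friends a b d) = pvF d (a, b) := by
  unfold find_common_friends pvF
  simp only [PySem.List.foldl_append_if_eq_filter, List.nil_append]
  unfold PySem.Set.len PySem.Set.inter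
  have hcong : List.filter ((d.getD b []).contains)
        (PySem.Set.ofList (d.getD a []))
      = List.filter (fun x => (PySem.Set.ofList (d.getD b [])).contains x)
        (PySem.Set.ofList (d.getD a [])) := by
    apply List.filter_congr
    intro x _
    rw [Bool.eq_iff_iff]
    simp [PySem.Set.contains_eq_listContains, PySem.Set.mem_ofList]
  rw [ofList_filter, hcong]

lemma alt_loop_eq (d : PySem.Dict String (List String)) :
    ∀ (ls : List String) (s : Option Int × List (String × String)),
      alt_loop d ls s = (combosAll ls []).foldl (pvStep d) s := by
  intro ls
  induction ls with
  | nil => intro s; rfl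
  | cons a t ih =>
      intro s
      simp only [alt_loop, combosAll, List.append_nil, List.foldl_append, List.foldl_map, ih]
      rfl

lemma argmax_fold (d : PySem.Dict String (List String)) :
    ∀ (rest processed : List (String × String)) (m : Int),
      (∀ x ∈ processed, pvF d x ≤ m) →
      rest.foldl (pvStep d) (some m, processed.filter (fun p => decide (pvF d p = m)))
        = (some ((rest.map (pvF d)).foldl max m),
           (processed ++ rest).filter (fun p => decide (pvF d p = (rest.map (pvF d)).foldl max m))) := by
  intro rest
  induction rest with
  | nil =>
      intro processed m _
      simp only [List.map_nil, List.foldl_nil, List.append_nil]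
      rfl
  | cons p rest' ih =>
      intro processed m hbd
      have hstep : pvStep d (some m, processed.filter (fun q => decide (pvF d q = m))) p
          = if pvF d p > m then (some (pvF d p), [(p.1, p.2)])
            else if pvF d p = m then (some m, processed.filter (fun q => decide (pvF d q = m)) ++ [(p.1, p.2)])
            else (some m, processed.filter (fun q => decide (pvF d q = m))) := rfl
      simp only [List.foldl_cons, List.map_cons, hstep, Prod.mk.eta]
      rcases lt_trichotomy m (pvF d p) with hlt | heq | hgt
      · rw [if_pos hlt]
        have h1 : [p] = (processed ++ [p]).filter (fun q => decide (pvF d q = pvF d p)) := by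
          rw [List.filter_append, List.filter_eq_nil_iff.mpr
                (fun x hx => by simp only [decide_eq_true_eq]; exact ne_of_lt (lt_of_le_of_lt (hbd x hx) hlt))]
          simp
        rw [h1, ih (processed ++ [p]) (pvF d p)
              (fun x hx => by
                rcases List.mem_append.mp hx with h | h
                · exact le_of_lt (lt_of_le_of_lt (hbd x h) hlt)
                · simp at h; subst h; exact le_rfl)]
        have hm : max m (pvF d p) = pvF d p := max_eq_right (le_of_lt hlt)
        simp [hm]
      · rw [if_neg (by omega), if_pos heq.symm]
        have h1 : processed.filter (fun q => decide (pvF d q = m)) ++ [p]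
            = (processed ++ [p]).filter (fun q => decide (pvF d q = m)) := by
          rw [List.filter_append]
          simp [heq.symm]
        rw [h1, ih (processed ++ [p]) m
              (fun x hx => by
                rcases List.mem_append.mp hx with h | h
                · exact hbd x h
                · simp at h; subst h; exact le_of_eq heq.symm)]
        have hm : max m (pvF d p) = m := by rw [← heq]; exact max_self m
        simp [hm]
      · rw [if_neg (by omega), if_neg (by omega)]
        have h1 : processed.filter (fun q => decide (pvF d q = m))
            = (processed ++ [p]).filter (fun q => decide (pvF d q = m)) := by
          rw [List.filter_append]
          simp [ne_of_lt hgt]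
        rw [h1, ih (processed ++ [p]) m
              (fun x hx => by
                rcases List.mem_append.mp hx with h | h
                · exact hbd x h
                · simp at h; subst h; exact le_of_lt hgt)]
        have hm : max m (pvF d p) = m := max_eq_left (le_of_lt hgt)
        simp [hm]

lemma select_fold (d : PySem.Dict String (List String)) (mx : Int) :
    ∀ (ps pre acc : List (String × String)),
      (PySem.List.enumerate (ps.map (pvF d)) (pre.length : Int)).foldl
          (fun out i => if i.2 = mx then out ++ [PySem.List.pyGetD (pre ++ ps) i.1 ("", "")] else out) acc
        = acc ++ ps.filter (fun p => decide (pvF d p = mx)) := by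
  intro ps
  induction ps with
  | nil => intro pre acc; simp
  | cons p pt ih =>
      intro pre acc
      simp only [List.map_cons, PySem.List.enumerate_cons, List.foldl_cons]
      have hget : PySem.List.pyGetD (pre ++ p :: pt) (pre.length : Int) ("", "") = p := by
        rw [PySem.List.pyGetD_natCast]
        simp [List.getD]
      have hshift : ((pre.length : Int) + 1) = (((pre ++ [p]).length : Nat) : Int) := by
        simp
      have happ : pre ++ p :: pt = (pre ++ [p]) ++ pt := by simp
      rw [hget, hshift, happ, List.filter_cons]
      by_cases hc : pvF d p = mx
      · rw [if_pos hc, show (decide (pvF d p = mx)) = true by simp [hc], ih (pre ++ [p]) (acc ++ [p])]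
        simp
      · rw [if_neg hc, show (decide (pvF d p = mx)) = false by simp [hc], ih (pre ++ [p]) acc]
        simp

lemma keys_ofList (fd : List (String × List String)) :
    (PySem.Dict.ofList fd).keys = PySem.Set.ofList (fd.map Prod.fst) := by
  show (fd.foldl (fun acc p => acc.insert p.1 p.2) PySem.Dict.empty).keys = _
  rw [PySem.Dict.keys_foldl_insert_key fd Prod.fst (fun _ x => x.2) PySem.Dict.empty]
  rw [PySem.Dict.keys_empty, PySem.Set.update_nil_left]

-- ===== VERDICT (by name: the statement is the Claim_ definition above) =====
theorem find_max_common_friends_spec : Claim_equal_find_max_common_friends := by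
  intro fd _ hpre
  unfold Spec_find_max_common_friends
  simp only [find_max_common_friends, find_max_common_friends_alt]
  set d := PySem.Dict.ofList fd with hd
  have hkeys : d.keys = PySem.Set.ofList (fd.map Prod.fst) := keys_ofList fd
  have hnd : d.keys.Nodup := PySem.Dict.nodup_keys_ofList fd
  have hlen : 2 ≤ d.keys.length := by
    unfold Pre_find_max_common_friends at hpre
    rw [hkeys]
    simpa using hpre
  obtain ⟨k0, k1, kt, hks⟩ : ∃ k0 k1 kt, d.keys = k0 :: k1 :: kt := by
    rcases hk : d.keys with _ | ⟨a0, _ | ⟨a1, at'⟩⟩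
    · rw [hk] at hlen; simp at hlen
    · rw [hk] at hlen; simp at hlen
    · exact ⟨_, _, _, rfl⟩
  -- A's pair list is the combinations list
  have hpairs : d.keys.foldl (fun pp i =>
      d.keys.foldl (fun pp j => if i ≠ j ∧ (j, i) ∉ pp then pp ++ [(i, j)] else pp) pp) []
      = combosAll d.keys [] :=
    outer_fold d.keys hnd d.keys [] rfl
  rw [hpairs]
  -- A's counts list is the map of B's count over the pairs
  have hcnts : (combosAll d.keys []).foldl
      (fun acc p => acc ++ [PySem.Set.len (find_common_friends p.1 p.2 d)]) []
      = (combosAll d.keys []).map (pvF d) := by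
    rw [PySem.List.foldl_append_singleton_eq_map]
    simp only [List.nil_append]
    exact List.map_congr_left (fun p _ => countA_eq d p.1 p.2)
  rw [hcnts]
  -- the combinations list is nonempty
  rcases hcs : combosAll d.keys [] with _ | ⟨p0, pt⟩
  · rw [hks] at hcs; simp [combosAll] at hcs
  -- A's max
  have hmax : (PySem.List.max? ((p0 :: pt).map (pvF d)) (fun x => x)).getD 0
      = (pt.map (pvF d)).foldl max (pvF d p0) := by
    rw [List.map_cons, PySem.List.max?_id_cons]; rfl
  -- A's selection loop
  have hsel : (PySem.List.enumerate ((p0 :: pt).map (pvF d))).foldl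
      (fun out i => if i.2 = (PySem.List.max? ((p0 :: pt).map (pvF d)) (fun x => x)).getD 0
                    then out ++ [PySem.List.pyGetD (p0 :: pt) i.1 ("", "")] else out) []
      = (p0 :: pt).filter (fun p => decide (pvF d p = (pt.map (pvF d)).foldl max (pvF d p0))) := by
    simp only [hmax]
    have := select_fold d ((pt.map (pvF d)).foldl max (pvF d p0)) (p0 :: pt) [] []
    simpa using this
  -- B's loop
  have hB : alt_loop d d.keys (none, []) =
      (some ((pt.map (pvF d)).foldl max (pvF d p0)),
       (p0 :: pt).filter (fun p => decide (pvF d p = (pt.map (pvF d)).foldl max (pvF d p0)))) := by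
    rw [alt_loop_eq d d.keys (none, []), hcs, List.foldl_cons]
    have hfirst : pvStep d (none, []) p0 = (some (pvF d p0), [(p0.1, p0.2)]) := rfl
    rw [hfirst]
    have h0 : ([(p0.1, p0.2)] : List (String × String))
        = [p0].filter (fun q => decide (pvF d q = pvF d p0)) := by simp
    rw [h0, argmax_fold d pt [p0] (pvF d p0)
          (by intro x hx; simp at hx; subst hx; exact le_rfl)]
    simp
  rw [hB, hsel, hmax]
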